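-- pv_equiv track=rewrite | github.com/Qindral/3D-Print | rod_simulation.py | sphere_offsets
-- ===== SOURCE A (Python) =====
-- from typing import Callable, Dict, List, Optional, Tuple
--
-- def sphere_offsets(radius: int) -> List[Tuple[int, int, int]]:
--     if radius <= 0:
--         return [(0, 0, 0)]
--     offsets: List[Tuple[int, int, int]] = []
--     radius_sq = radius * radius
--     for dx in range(-radius, radius + 1):
--         for dy in range(-radius, radius + 1):
--             for dz in range(-radius, radius + 1):
--                 if dx * dx + dy * dy + dz * dz <= radius_sq:
--                     offsets.append((dx, dy, dz))
--     if not offsets: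
--         offsets.append((0, 0, 0))
--     return offsets
-- ===== SOURCE B (Python) =====
-- from typing import List, Tuple
--
-- def sphere_offsets(radius: int) -> List[Tuple[int, int, int]]:
--     if radius <= 0:
--         return [(0, 0, 0)]
--     offsets: List[Tuple[int, int, int]] = []
--     radius_sq = radius * radius
--     for dx in range(-radius, radius + 1):
--         dx_sq = dx * dx
--         for dy in range(-radius, radius + 1):
--             rem = radius_sq - dx_sq - dy * dy
--             if rem < 0:
--                 continue
--             # largest m with m*m <= rem (integer sqrt by downward scan from radius)
--             m = radius
--             while m * m > rem:
--                 m -= 1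
--             for dz in range(-m, m + 1):
--                 offsets.append((dx, dy, dz))
--     return offsets
-- ===== Notes on version B (the rewrite author's own statement) =====
-- stated objective: alternative
-- what changed: The innermost dz loop with its per-point sphere test is replaced by computing rem = r^2-dx^2-dy^2 per (dx,dy) pair, skipping negative rem, finding the integer sqrt m of rem, and emitting the whole dz range -m..m directly; the unreachable empty-list fallback is dropped.
import Mathlib
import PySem

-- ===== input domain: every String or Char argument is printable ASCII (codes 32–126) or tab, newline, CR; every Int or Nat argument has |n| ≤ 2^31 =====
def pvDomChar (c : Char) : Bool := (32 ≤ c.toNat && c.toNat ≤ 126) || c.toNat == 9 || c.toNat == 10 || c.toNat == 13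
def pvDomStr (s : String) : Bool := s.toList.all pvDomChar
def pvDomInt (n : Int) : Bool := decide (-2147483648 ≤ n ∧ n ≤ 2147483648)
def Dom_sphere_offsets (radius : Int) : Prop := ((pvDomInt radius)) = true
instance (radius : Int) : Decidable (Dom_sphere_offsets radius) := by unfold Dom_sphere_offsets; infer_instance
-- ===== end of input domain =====

-- B replaces the innermost dz loop and per-point test by an integer-sqrt bound per (dx,dy)
-- pair, emitting the dz range directly (alternative algorithm; output is the same size).


-- ===== PORT A =====
def sphere_offsets (radius : Int) : List (Int × Int × Int) :=
  if radius ≤ 0 then [(0, 0, 0)]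
  else
    let radius_sq := radius * radius
    let offsets :=
      (PySem.List.pyRange (-radius) (radius + 1) 1).foldl (fun acc dx =>
        (PySem.List.pyRange (-radius) (radius + 1) 1).foldl (fun acc dy =>
          (PySem.List.pyRange (-radius) (radius + 1) 1).foldl (fun acc dz =>
            if dx * dx + dy * dy + dz * dz ≤ radius_sq then acc ++ [(dx, dy, dz)] else acc)
            acc) acc) []
    if offsets = [] then offsets ++ [(0, 0, 0)] else offsets

-- ===== PORT B =====
-- 'm = radius; while m*m > rem: m -= 1' — structural recursion on m, exact for radius ≥ 0
-- (here radius > 0) and rem ≥ 0 (the loop is only reached with rem ≥ 0, where it stops by m = 0).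
def pvShrink : Nat → Int → Int
  | 0, _ => 0
  | n + 1, rem => if rem < ((n : Int) + 1) * ((n : Int) + 1) then pvShrink n rem else (n : Int) + 1

def sphere_offsets_alt (radius : Int) : List (Int × Int × Int) :=
  if radius ≤ 0 then [(0, 0, 0)]
  else
    let radius_sq := radius * radius
    (PySem.List.pyRange (-radius) (radius + 1) 1).foldl (fun acc dx =>
      let dx_sq := dx * dx
      (PySem.List.pyRange (-radius) (radius + 1) 1).foldl (fun acc dy =>
        let rem := radius_sq - dx_sq - dy * dy
        if rem < 0 then acc
        else
          let m := pvShrink radius.toNat rem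
          (PySem.List.pyRange (-m) (m + 1) 1).foldl (fun acc dz => acc ++ [(dx, dy, dz)]) acc)
        acc) []

-- ===== PRECONDITION & SPEC =====
def Spec_sphere_offsets (radius : Int) (out : List (Int × Int × Int)) : Prop := out = sphere_offsets_alt radius
instance (radius : Int) (out : List (Int × Int × Int)) : Decidable (Spec_sphere_offsets radius out) := by unfold Spec_sphere_offsets; infer_instance

-- ===== CLAIM (what is proved, stated in full; the proofs are below) =====
def Claim_equal_sphere_offsets : Prop := ∀ (radius : Int), Dom_sphere_offsets radius → Spec_sphere_offsets radius (sphere_offsets radius)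

-- ===== LEMMAS AND PROOFS =====

-- pvShrink n rem is the integer square root of rem when 0 ≤ rem < (n+1)^2
lemma pvShrink_spec (n : Nat) (rem : Int) (h0 : 0 ≤ rem)
    (hn : rem < ((n : Int) + 1) * ((n : Int) + 1)) :
    0 ≤ pvShrink n rem ∧ pvShrink n rem * pvShrink n rem ≤ rem ∧
      rem < (pvShrink n rem + 1) * (pvShrink n rem + 1) := by
  induction n with
  | zero => simpa [pvShrink] using ⟨h0, hn⟩
  | succ k ih =>
    by_cases h : rem < ((k : Int) + 1) * ((k : Int) + 1)
    · simpa [pvShrink, h] using ih h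
    · have h' := not_lt.mp h
      simp only [pvShrink, if_neg h]
      push_cast at hn h' ⊢
      refine ⟨by positivity, by linarith, by linarith⟩

-- the filtered dz range of A equals the full range -m..m of B
lemma filter_range_eq (r dx dy m : Int) (hr : 0 < r) (hm0 : 0 ≤ m)
    (hlo : m * m ≤ r * r - dx * dx - dy * dy)
    (hhi : r * r - dx * dx - dy * dy < (m + 1) * (m + 1)) :
    (PySem.List.pyRange (-r) (r + 1) 1).filter
        (fun dz => decide (dx * dx + dy * dy + dz * dz ≤ r * r)) =
      PySem.List.pyRange (-m) (m + 1) 1 := by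
  have hmr : m ≤ r := by nlinarith
  rw [PySem.List.pyRange_one_append (-r) (-m) (r + 1) (by omega) (by omega),
      PySem.List.pyRange_one_append (-m) (m + 1) (r + 1) (by omega) (by omega),
      List.filter_append, List.filter_append]
  have hL : (PySem.List.pyRange (-r) (-m) 1).filter
      (fun dz => decide (dx * dx + dy * dy + dz * dz ≤ r * r)) = [] := by
    rw [List.filter_eq_nil_iff]
    intro z hz
    rw [PySem.List.mem_pyRange_one] at hz
    simp only [decide_eq_true_eq]
    nlinarith [hz.1, hz.2]
  have hR : (PySem.List.pyRange (m + 1) (r + 1) 1).filter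
      (fun dz => decide (dx * dx + dy * dy + dz * dz ≤ r * r)) = [] := by
    rw [List.filter_eq_nil_iff]
    intro z hz
    rw [PySem.List.mem_pyRange_one] at hz
    simp only [decide_eq_true_eq]
    nlinarith [hz.1, hz.2]
  have hM : (PySem.List.pyRange (-m) (m + 1) 1).filter
      (fun dz => decide (dx * dx + dy * dy + dz * dz ≤ r * r)) =
      PySem.List.pyRange (-m) (m + 1) 1 := by
    rw [List.filter_eq_self]
    intro z hz
    rw [PySem.List.mem_pyRange_one] at hz
    simp only [decide_eq_true_eq]
    nlinarith [hz.1, hz.2]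
  simp [hL, hM, hR]

-- A's innermost dz loop equals B's per-pair body
lemma inner_eq (r dx dy : Int) (hr : 0 < r) (acc : List (Int × Int × Int)) :
    (PySem.List.pyRange (-r) (r + 1) 1).foldl (fun acc dz =>
        if dx * dx + dy * dy + dz * dz ≤ r * r then acc ++ [(dx, dy, dz)] else acc) acc =
      (if r * r - dx * dx - dy * dy < 0 then acc
       else
         (PySem.List.pyRange (-(pvShrink r.toNat (r * r - dx * dx - dy * dy)))
             (pvShrink r.toNat (r * r - dx * dx - dy * dy) + 1) 1).foldl
           (fun acc dz => acc ++ [(dx, dy, dz)]) acc) := by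
  set rem := r * r - dx * dx - dy * dy with hrem
  rw [PySem.List.foldl_append_ite]
  by_cases hneg : rem < 0
  · have : (PySem.List.pyRange (-r) (r + 1) 1).filter
        (fun dz => decide (dx * dx + dy * dy + dz * dz ≤ r * r)) = [] := by
      rw [List.filter_eq_nil_iff]
      intro z hz
      simp only [decide_eq_true_eq]
      nlinarith [mul_self_nonneg z]
    simp [hneg, this]
  · rw [not_lt] at hneg
    have hrt : ((r.toNat : Int)) = r := Int.toNat_of_nonneg (le_of_lt hr)
    have hbound : rem < ((r.toNat : Int) + 1) * ((r.toNat : Int) + 1) := by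
      rw [hrt]; nlinarith [mul_self_nonneg dx, mul_self_nonneg dy]
    obtain ⟨hm0, hlo, hhi⟩ := pvShrink_spec r.toNat rem hneg hbound
    rw [PySem.List.foldl_append_singleton_eq_map,
        filter_range_eq r dx dy (pvShrink r.toNat rem) hr hm0 hlo hhi]
    simp [not_lt.mpr hneg]

-- per-pair contribution of B, as a list
def pvG (r dx dy : Int) : List (Int × Int × Int) :=
  if r * r - dx * dx - dy * dy < 0 then []
  else
    (PySem.List.pyRange (-(pvShrink r.toNat (r * r - dx * dx - dy * dy)))
        (pvShrink r.toNat (r * r - dx * dx - dy * dy) + 1) 1).map (fun dz => (dx, dy, dz))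

-- B's loop nest is the double flatMap of pvG
lemma bfold_eq_flatMap (r : Int) :
    (PySem.List.pyRange (-r) (r + 1) 1).foldl (fun acc dx =>
        (PySem.List.pyRange (-r) (r + 1) 1).foldl (fun acc dy =>
          if r * r - dx * dx - dy * dy < 0 then acc
          else
            (PySem.List.pyRange (-(pvShrink r.toNat (r * r - dx * dx - dy * dy)))
                (pvShrink r.toNat (r * r - dx * dx - dy * dy) + 1) 1).foldl
              (fun acc dz => acc ++ [(dx, dy, dz)]) acc) acc)
      ([] : List (Int × Int × Int)) =
      (PySem.List.pyRange (-r) (r + 1) 1).flatMap (fun dx =>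
        (PySem.List.pyRange (-r) (r + 1) 1).flatMap (fun dy => pvG r dx dy)) := by
  have hinner : ∀ (dx : Int) (acc : List (Int × Int × Int)),
      (PySem.List.pyRange (-r) (r + 1) 1).foldl (fun acc dy =>
        if r * r - dx * dx - dy * dy < 0 then acc
        else
          (PySem.List.pyRange (-(pvShrink r.toNat (r * r - dx * dx - dy * dy)))
              (pvShrink r.toNat (r * r - dx * dx - dy * dy) + 1) 1).foldl
            (fun acc dz => acc ++ [(dx, dy, dz)]) acc) acc =
      acc ++ (PySem.List.pyRange (-r) (r + 1) 1).flatMap (fun dy => pvG r dx dy) := by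
    intro dx acc
    rw [← PySem.List.foldl_append_eq_flatMap]
    apply PySem.List.foldl_congr_mem
    intro a dy _
    unfold pvG
    split
    · simp
    · rw [PySem.List.foldl_append_singleton_eq_map]
  calc _ = (PySem.List.pyRange (-r) (r + 1) 1).foldl (fun acc dx =>
        acc ++ (PySem.List.pyRange (-r) (r + 1) 1).flatMap (fun dy => pvG r dx dy))
        ([] : List (Int × Int × Int)) := by
        apply PySem.List.foldl_congr_mem
        intro a dx _
        exact hinner dx a
    _ = _ := by rw [PySem.List.foldl_append_eq_flatMap]; simp

-- for radius > 0 the accumulated list contains (0,0,0), so A's empty fallback is dead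
lemma bfold_ne_nil (r : Int) (hr : 0 < r) :
    (PySem.List.pyRange (-r) (r + 1) 1).flatMap (fun dx =>
      (PySem.List.pyRange (-r) (r + 1) 1).flatMap (fun dy => pvG r dx dy)) ≠ [] := by
  have h00 : (0, 0, 0) ∈ (PySem.List.pyRange (-r) (r + 1) 1).flatMap (fun dx =>
      (PySem.List.pyRange (-r) (r + 1) 1).flatMap (fun dy => pvG r dx dy)) := by
    have hmem0 : (0 : Int) ∈ PySem.List.pyRange (-r) (r + 1) 1 := by
      rw [PySem.List.mem_pyRange_one]; omega
    refine List.mem_flatMap.mpr ⟨0, hmem0, List.mem_flatMap.mpr ⟨0, hmem0, ?_⟩⟩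
    unfold pvG
    have hneg : ¬ (r * r - 0 * 0 - 0 * 0 < 0) := by nlinarith
    rw [if_neg hneg]
    have h0 : (0:Int) ≤ r * r - 0 * 0 - 0 * 0 := by nlinarith
    have hrt : ((r.toNat : Int)) = r := Int.toNat_of_nonneg (le_of_lt hr)
    have hbound : r * r - 0 * 0 - 0 * 0 < ((r.toNat : Int) + 1) * ((r.toNat : Int) + 1) := by
      rw [hrt]; nlinarith
    obtain ⟨hm0, _, _⟩ := pvShrink_spec r.toNat _ h0 hbound
    refine List.mem_map.mpr ⟨0, ?_, rfl⟩
    rw [PySem.List.mem_pyRange_one]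
    omega
  intro hnil
  rw [hnil] at h00
  exact List.not_mem_nil h00

-- ===== VERDICT (by name: the statement is the Claim_ definition above) =====
theorem sphere_offsets_spec : Claim_equal_sphere_offsets := by
  intro radius _
  unfold Spec_sphere_offsets sphere_offsets sphere_offsets_alt
  by_cases hr : radius ≤ 0
  · simp [hr]
  · rw [not_le] at hr
    rw [if_neg (not_le.mpr hr), if_neg (not_le.mpr hr)]
    have hcore :
        (PySem.List.pyRange (-radius) (radius + 1) 1).foldl (fun acc dx =>
          (PySem.List.pyRange (-radius) (radius + 1) 1).foldl (fun acc dy =>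
            (PySem.List.pyRange (-radius) (radius + 1) 1).foldl (fun acc dz =>
              if dx * dx + dy * dy + dz * dz ≤ radius * radius then acc ++ [(dx, dy, dz)]
              else acc) acc) acc) ([] : List (Int × Int × Int)) =
        (PySem.List.pyRange (-radius) (radius + 1) 1).foldl (fun acc dx =>
          (PySem.List.pyRange (-radius) (radius + 1) 1).foldl (fun acc dy =>
            if radius * radius - dx * dx - dy * dy < 0 then acc
            else
              (PySem.List.pyRange (-(pvShrink radius.toNat (radius * radius - dx * dx - dy * dy)))
                  (pvShrink radius.toNat (radius * radius - dx * dx - dy * dy) + 1) 1).foldl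
                (fun acc dz => acc ++ [(dx, dy, dz)]) acc) acc) ([] : List (Int × Int × Int)) := by
      apply PySem.List.foldl_congr_mem
      intro a dx _
      apply PySem.List.foldl_congr_mem
      intro a' dy _
      exact inner_eq radius dx dy hr a'
    simp only []
    rw [hcore, bfold_eq_flatMap]
    rw [if_neg (bfold_ne_nil radius hr)]
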